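-- pv_equiv track=rewrite | github.com/willfinnigan/RetroBioCat | retrobiocat_web/app/retrobiocat/functions/get_images.py | apply_smiles_to_filename_check
-- ===== SOURCE A (Python) =====
-- def apply_smiles_to_filename_check(smile):
--     new_string = ''
--     smile = str(smile)
--     for letter in smile:
--         if letter == '#':
--             new_string += '=-'
--         elif letter == '/':
--             new_string += 'fs'
--         else:
--             new_string += letter
--     return new_string
-- ===== SOURCE B (Python) =====
-- def apply_smiles_to_filename_check(smile):
--     # Two staged whole-string passes: first rewrite all '#', then all '/'.
--     # Safe to stage because neither replacement text contains '#' or '/'.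
--     s = str(smile)
--     s = s.replace('#', '=-')
--     return s.replace('/', 'fs')
-- ===== Notes on version B (the rewrite author's own statement) =====
-- stated objective: idiomatic
-- what changed: Replaces A's single per-character branch-and-append loop with two staged whole-string substitution passes (str.replace for '#' then for '/'), correct because neither replacement text contains a character rewritten by the other pass.
import Mathlib
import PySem

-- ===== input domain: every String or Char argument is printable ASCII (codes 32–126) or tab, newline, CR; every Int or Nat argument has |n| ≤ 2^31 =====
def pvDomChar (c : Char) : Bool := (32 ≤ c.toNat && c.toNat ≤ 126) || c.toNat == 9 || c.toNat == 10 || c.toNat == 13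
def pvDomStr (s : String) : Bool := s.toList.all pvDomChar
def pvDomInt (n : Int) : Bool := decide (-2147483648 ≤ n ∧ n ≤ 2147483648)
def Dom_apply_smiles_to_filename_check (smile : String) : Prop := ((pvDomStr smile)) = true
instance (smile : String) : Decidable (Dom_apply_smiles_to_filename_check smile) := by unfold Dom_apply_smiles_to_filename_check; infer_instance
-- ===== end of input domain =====

-- B replaces A's per-character branch-and-append loop with two staged whole-string str.replace passes ('#' first, then '/'); idiomatic, same output since neither replacement text contains a character the other pass rewrites.


-- ===== PORT A =====
-- Port of A: per-character loop, branching on '#' and '/', appending to an accumulator.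
def apply_smiles_to_filename_check (smile : String) : String :=
  smile.toList.foldl
    (fun new_string letter =>
      if letter = '#' then new_string ++ "=-"
      else if letter = '/' then new_string ++ "fs"
      else new_string ++ String.singleton letter) ""

-- ===== PORT B =====
-- Port of B: two staged whole-string replace passes, exactly Source B's two str.replace calls.
def apply_smiles_to_filename_check_alt (smile : String) : String :=
  PySem.Str.replace (PySem.Str.replace smile "#" "=-") "/" "fs"

-- ===== PRECONDITION & SPEC =====
def Spec_apply_smiles_to_filename_check (smile : String) (out : String) : Prop := out = apply_smiles_to_filename_check_alt smile
instance (smile : String) (out : String) : Decidable (Spec_apply_smiles_to_filename_check smile out) := by unfold Spec_apply_smiles_to_filename_check; infer_instance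

-- ===== CLAIM (what is proved, stated in full; the proofs are below) =====
def Claim_equal_apply_smiles_to_filename_check : Prop := ∀ (smile : String), Dom_apply_smiles_to_filename_check smile → Spec_apply_smiles_to_filename_check smile (apply_smiles_to_filename_check smile)

-- ===== LEMMAS AND PROOFS =====

-- single-character substitution as a flatMap
def pvSubst (c : Char) (rep : List Char) (x : Char) : List Char :=
  if x = c then rep else [x]

-- replace.go with a single-character pattern is the flatMap of pvSubst (given enough fuel)
theorem pv_replace_go_single (c : Char) (rep : List Char) (l acc : List Char) (fuel : Nat)
    (h : l.length ≤ fuel) :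
    PySem.Chars.replace.go [c] rep fuel l acc
      = acc.reverse ++ l.flatMap (pvSubst c rep) := by
  induction l generalizing acc fuel with
  | nil =>
    cases fuel <;> simp [PySem.Chars.replace.go]
  | cons x t ih =>
    cases fuel with
    | zero => simp at h
    | succ n =>
      have hn : t.length ≤ n := by simpa using h
      by_cases hx : c = x
      · subst hx
        simp only [PySem.Chars.replace.go, List.isPrefixOf, BEq.rfl, Bool.true_and, if_pos,
          List.length_cons, List.length_nil]
        have hd : List.drop (0 + 1) (c :: t) = t := by simp
        rw [hd, ih _ _ hn]
        simp [pvSubst]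
      · have hpre : List.isPrefixOf [c] (x :: t) = false := by
          simp [List.isPrefixOf, hx]
        simp only [PySem.Chars.replace.go, hpre, Bool.false_eq_true, if_neg, not_false_iff]
        rw [ih _ _ hn]
        simp [pvSubst, Ne.symm hx]

theorem pv_replace_single (c : Char) (rep : List Char) (l : List Char) :
    PySem.Chars.replace l [c] rep = l.flatMap (pvSubst c rep) := by
  unfold PySem.Chars.replace
  simp only [List.isEmpty_cons, Bool.false_eq_true, if_neg, not_false_iff]
  simpa using pv_replace_go_single c rep l [] l.length le_rfl

-- A's loop produces the combined substitution as a flatMap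
def pvCombined (x : Char) : List Char :=
  if x = '#' then ['=', '-'] else if x = '/' then ['f', 's'] else [x]

theorem pv_foldl_eq (l : List Char) (acc : List Char) :
    l.foldl
      (fun new_string letter =>
        if letter = '#' then new_string ++ "=-"
        else if letter = '/' then new_string ++ "fs"
        else new_string ++ String.singleton letter) (String.ofList acc)
    = String.ofList (acc ++ l.flatMap pvCombined) := by
  induction l generalizing acc with
  | nil => simp
  | cons c l ih =>
    simp only [List.foldl_cons, List.flatMap_cons]
    by_cases h1 : c = '#'
    · subst h1
      rw [if_pos rfl]
      have : (String.ofList acc) ++ "=-" = String.ofList (acc ++ ['=', '-']) := by simp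
      rw [this, ih]
      simp [pvCombined]
    · rw [if_neg h1]
      by_cases h2 : c = '/'
      · subst h2
        rw [if_pos rfl]
        have : (String.ofList acc) ++ "fs" = String.ofList (acc ++ ['f', 's']) := by simp
        rw [this, ih]
        simp [pvCombined]
      · rw [if_neg h2]
        have : (String.ofList acc) ++ String.singleton c = String.ofList (acc ++ [c]) := by
          simp [String.singleton_eq_ofList]
        rw [this, ih]
        simp [pvCombined, h1, h2]

-- staging: the '/'-pass after the '#'-pass is the combined substitution
theorem pv_staged_eq (l : List Char) :
    (l.flatMap (pvSubst '#' ['=', '-'])).flatMap (pvSubst '/' ['f', 's'])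
      = l.flatMap pvCombined := by
  rw [List.flatMap_assoc]
  apply List.flatMap_congr  -- pointwise
  intro x _
  by_cases h1 : x = '#'
  · subst h1; simp [pvSubst, pvCombined]
  · by_cases h2 : x = '/'
    · subst h2; simp [pvSubst, pvCombined]
    · simp [pvSubst, pvCombined, h1, h2]

-- ===== VERDICT (by name: the statement is the Claim_ definition above) =====
theorem apply_smiles_to_filename_check_spec : Claim_equal_apply_smiles_to_filename_check := by
  intro smile _
  unfold Spec_apply_smiles_to_filename_check apply_smiles_to_filename_check apply_smiles_to_filename_check_alt
  apply String.toList_injective  -- compare as char lists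
  have hA : (smile.toList.foldl
      (fun new_string letter =>
        if letter = '#' then new_string ++ "=-"
        else if letter = '/' then new_string ++ "fs"
        else new_string ++ String.singleton letter) "").toList
      = smile.toList.flatMap pvCombined := by
    have h := pv_foldl_eq smile.toList []
    simpa using congrArg String.toList h
  rw [hA, PySem.Str.toList_replace, PySem.Str.toList_replace]
  show smile.toList.flatMap pvCombined
      = PySem.Chars.replace (PySem.Chars.replace smile.toList ['#'] ['=', '-']) ['/'] ['f', 's']
  rw [pv_replace_single, pv_replace_single, pv_staged_eq]
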